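-- pv_equiv track=rewrite | github.com/phil8192/tile-maps | x.py | eval_candidate
-- ===== SOURCE A (Python) =====
-- def eval_candidate(grid, adj):
--     score = 0
--     row_len = len(grid)
--     col_len = len(grid[0])
--     for i in range(0, row_len):
--         row = grid[i]
--         for j in range(0, col_len):
--            centre = row[j]
--            if centre:
--                if i > 0:
--                    north = grid[i - 1][j]
--                    if north and adj[centre][north]:
--                        score += 1
--                if j < col_len - 1:
--                    east = grid[i][j + 1]
--                    if east and adj[centre][east]:
--                        score += 1
--                if i < row_len - 1:
--                    south = grid[i + 1][j]
--                    if south and adj[centre][south]: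
--                        score += 1
--                if j > 0:
--                    west = grid[i][j - 1]
--                    if west and adj[centre][west]:
--                        score += 1
--     return score
-- ===== SOURCE B (Python) =====
-- def eval_candidate(grid, adj):
--     # Staged passes with hash aggregation: two edge passes tally the
--     # multiplicity of every directed truthy-neighbour pair in a dict, then a
--     # final pass evaluates adj once per DISTINCT pair and weights it by the
--     # pair's multiplicity. No running score is kept during the grid scan.
--     row_len = len(grid)
--     col_len = len(grid[0])
--     pairs = {}
--     # pass 1: horizontal edges
--     for i in range(row_len):
--         for j in range(col_len - 1):
--             a = grid[i][j]
--             b = grid[i][j + 1]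
--             if a and b:
--                 pairs[(a, b)] = pairs.get((a, b), 0) + 1
--                 pairs[(b, a)] = pairs.get((b, a), 0) + 1
--     # pass 2: vertical edges
--     for i in range(row_len - 1):
--         for j in range(col_len):
--             a = grid[i][j]
--             b = grid[i + 1][j]
--             if a and b:
--                 pairs[(a, b)] = pairs.get((a, b), 0) + 1
--                 pairs[(b, a)] = pairs.get((b, a), 0) + 1
--     # pass 3: one adj lookup per distinct directed pair
--     score = 0
--     for (a, b), c in pairs.items():
--         if adj[a][b]:
--             score += c
--     return score
-- ===== Notes on version B (the rewrite author's own statement) =====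
-- stated objective: alternative
-- what changed: Replaces A's single-pass running-score scan (four neighbour checks and an adj lookup per truthy cell) with staged passes over a different data structure: two edge passes build a dictionary counting the multiplicity of each directed truthy-neighbour pair, then a final pass evaluates adj once per DISTINCT pair and adds its multiplicity.
import Mathlib
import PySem

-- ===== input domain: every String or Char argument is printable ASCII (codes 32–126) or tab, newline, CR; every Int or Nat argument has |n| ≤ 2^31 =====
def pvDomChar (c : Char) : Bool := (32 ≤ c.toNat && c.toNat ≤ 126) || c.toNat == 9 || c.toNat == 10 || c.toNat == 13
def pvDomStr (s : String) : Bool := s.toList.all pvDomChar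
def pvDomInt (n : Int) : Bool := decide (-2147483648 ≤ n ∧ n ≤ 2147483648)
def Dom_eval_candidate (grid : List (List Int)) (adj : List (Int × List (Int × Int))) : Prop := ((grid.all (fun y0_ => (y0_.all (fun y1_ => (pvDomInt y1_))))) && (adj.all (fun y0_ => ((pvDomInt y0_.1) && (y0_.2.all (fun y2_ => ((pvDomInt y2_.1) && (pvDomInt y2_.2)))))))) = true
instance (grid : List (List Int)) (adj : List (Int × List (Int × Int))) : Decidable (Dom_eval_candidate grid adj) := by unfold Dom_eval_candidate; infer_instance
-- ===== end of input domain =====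

-- B replaces A's single-pass running-score scan with staged passes over a different data
-- structure: two edge passes tally a dictionary of directed truthy-neighbour-pair
-- multiplicities, then a final pass scores adj once per distinct pair (alternative, same cost class).

-- shared helper: the Python lookup adj[a][b] (dict of dicts); total via defaults — Pre_ guarantees the keys exist
def adjVal (adj : List (Int × List (Int × Int))) (a b : Int) : Int :=
  PySem.Dict.getD (PySem.Dict.mk (PySem.Dict.getD (PySem.Dict.mk adj) a [])) b 0

-- ===== PORT A =====
def eval_candidate (grid : List (List Int)) (adj : List (Int × List (Int × Int))) : Int :=
  let row_len := grid.length
  let col_len := (grid.getD 0 []).length   -- grid[0]: Pre_ excludes grid = []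
  (List.range row_len).foldl (fun score i =>
    let row := grid.getD i []
    (List.range col_len).foldl (fun score j =>
      let centre := row.getD j 0           -- row[j]: Pre_ guarantees j < row.length
      if centre ≠ 0 then
        let score := if 0 < i then
            (let north := (grid.getD (i - 1) []).getD j 0
             if north ≠ 0 ∧ adjVal adj centre north ≠ 0 then score + 1 else score)
          else score
        let score := if j < col_len - 1 then
            (let east := (grid.getD i []).getD (j + 1) 0
             if east ≠ 0 ∧ adjVal adj centre east ≠ 0 then score + 1 else score)
          else score
        let score := if i < row_len - 1 then
            (let south := (grid.getD (i + 1) []).getD j 0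
             if south ≠ 0 ∧ adjVal adj centre south ≠ 0 then score + 1 else score)
          else score
        let score := if 0 < j then
            (let west := (grid.getD i []).getD (j - 1) 0
             if west ≠ 0 ∧ adjVal adj centre west ≠ 0 then score + 1 else score)
          else score
        score
      else score) score) 0

-- ===== PORT B =====
def eval_candidate_alt (grid : List (List Int)) (adj : List (Int × List (Int × Int))) : Int :=
  let row_len := grid.length
  let col_len := (grid.getD 0 []).length
  -- pass 1: horizontal edges
  let pairs : PySem.Dict (Int × Int) Int :=
    (List.range row_len).foldl (fun d i =>
      (List.range (col_len - 1)).foldl (fun d j =>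
        let a := (grid.getD i []).getD j 0
        let b := (grid.getD i []).getD (j + 1) 0
        if a ≠ 0 ∧ b ≠ 0 then
          let d := d.insert (a, b) (d.getD (a, b) 0 + 1)
          d.insert (b, a) (d.getD (b, a) 0 + 1)
        else d) d) PySem.Dict.empty
  -- pass 2: vertical edges
  let pairs :=
    (List.range (row_len - 1)).foldl (fun d i =>
      (List.range col_len).foldl (fun d j =>
        let a := (grid.getD i []).getD j 0
        let b := (grid.getD (i + 1) []).getD j 0
        if a ≠ 0 ∧ b ≠ 0 then
          let d := d.insert (a, b) (d.getD (a, b) 0 + 1)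
          d.insert (b, a) (d.getD (b, a) 0 + 1)
        else d) d) pairs
  -- pass 3: one adj lookup per distinct directed pair
  pairs.items.foldl (fun score kv =>
    if adjVal adj kv.1.1 kv.1.2 ≠ 0 then score + kv.2 else score) 0

-- ===== PRECONDITION & SPEC =====
-- the value of cell (i, j), 0 when out of range (Pre_ keeps all accessed indices in range)
def cellAt (grid : List (List Int)) (i j : Nat) : Int := (grid.getD i []).getD j 0

-- both adj[a] and adj[a][b] exist (Python would raise KeyError otherwise)
def keyOk (adj : List (Int × List (Int × Int))) (a b : Int) : Bool :=
  ((PySem.Dict.get? (PySem.Dict.mk adj) a).bind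
    (fun d => PySem.Dict.get? (PySem.Dict.mk d) b)).isSome

-- Pre_ = exactly the inputs on which the Python A returns: grid nonempty (grid[0] is read),
-- every row at least as long as row 0 (row[j] is read for every j < len(grid[0])), and for
-- every orthogonally adjacent pair of truthy cells the adjacency keys exist (KeyError otherwise).
def neighOk (grid : List (List Int)) (adj : List (Int × List (Int × Int))) (i j : Nat) : Bool :=
  cellAt grid i j == 0 ||
  ((!decide (0 < i) || cellAt grid (i - 1) j == 0 || keyOk adj (cellAt grid i j) (cellAt grid (i - 1) j)) &&
   (!decide (j + 1 < (grid.getD 0 []).length) || cellAt grid i (j + 1) == 0 || keyOk adj (cellAt grid i j) (cellAt grid i (j + 1))) &&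
   (!decide (i + 1 < grid.length) || cellAt grid (i + 1) j == 0 || keyOk adj (cellAt grid i j) (cellAt grid (i + 1) j)) &&
   (!decide (0 < j) || cellAt grid i (j - 1) == 0 || keyOk adj (cellAt grid i j) (cellAt grid i (j - 1))))

def Pre_eval_candidate (grid : List (List Int)) (adj : List (Int × List (Int × Int))) : Prop :=
  grid ≠ [] ∧
  (∀ row ∈ grid, (grid.getD 0 []).length ≤ row.length) ∧
  ((List.range grid.length).all fun i =>
    (List.range (grid.getD 0 []).length).all fun j => neighOk grid adj i j) = true
instance (grid : List (List Int)) (adj : List (Int × List (Int × Int))) : Decidable (Pre_eval_candidate grid adj) := by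
  unfold Pre_eval_candidate; infer_instance

def pvWitness_eval_candidate : List (List Int) × (List (Int × List (Int × Int))) :=
  ([[1, 2], [0, 1]], [(1, [(2, 1), (1, 0)]), (2, [(1, 0), (2, 0)])])

def Spec_eval_candidate (grid : List (List Int)) (adj : List (Int × List (Int × Int))) (out : Int) : Prop := out = eval_candidate_alt grid adj
instance (grid : List (List Int)) (adj : List (Int × List (Int × Int))) (out : Int) : Decidable (Spec_eval_candidate grid adj out) := by unfold Spec_eval_candidate; infer_instance

-- ===== CLAIM (what is proved, stated in full; the proofs are below) =====
def Claim_equal_eval_candidate : Prop := ∀ (grid : List (List Int)) (adj : List (Int × List (Int × Int))), Dom_eval_candidate grid adj → Pre_eval_candidate grid adj → Spec_eval_candidate grid adj (eval_candidate grid adj)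

-- ===== LEMMAS AND PROOFS =====

-- B-shaped directed 0/1 indicators for the two directions of each horizontal and
-- vertical grid edge
def dirH (g : List (List Int)) (adj : List (Int × List (Int × Int))) (i j : Nat) : Int :=
  if cellAt g i j ≠ 0 then
    (if j + 1 < (g.getD 0 []).length then
      (if cellAt g i (j + 1) ≠ 0 then
        (if adjVal adj (cellAt g i j) (cellAt g i (j + 1)) ≠ 0 then 1 else 0) else 0) else 0) else 0
def dirHrev (g : List (List Int)) (adj : List (Int × List (Int × Int))) (i j : Nat) : Int :=
  if cellAt g i j ≠ 0 then
    (if j + 1 < (g.getD 0 []).length then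
      (if cellAt g i (j + 1) ≠ 0 then
        (if adjVal adj (cellAt g i (j + 1)) (cellAt g i j) ≠ 0 then 1 else 0) else 0) else 0) else 0
def dirV (g : List (List Int)) (adj : List (Int × List (Int × Int))) (i j : Nat) : Int :=
  if cellAt g i j ≠ 0 then
    (if i + 1 < g.length then
      (if cellAt g (i + 1) j ≠ 0 then
        (if adjVal adj (cellAt g i j) (cellAt g (i + 1) j) ≠ 0 then 1 else 0) else 0) else 0) else 0
def dirVrev (g : List (List Int)) (adj : List (Int × List (Int × Int))) (i j : Nat) : Int :=
  if cellAt g i j ≠ 0 then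
    (if i + 1 < g.length then
      (if cellAt g (i + 1) j ≠ 0 then
        (if adjVal adj (cellAt g (i + 1) j) (cellAt g i j) ≠ 0 then 1 else 0) else 0) else 0) else 0

-- A-shaped per-cell indicators, nested exactly like A's guards
def nA (g : List (List Int)) (adj : List (Int × List (Int × Int))) (i j : Nat) : Int :=
  if cellAt g i j ≠ 0 then
    (if 0 < i then
      (if cellAt g (i - 1) j ≠ 0 ∧ adjVal adj (cellAt g i j) (cellAt g (i - 1) j) ≠ 0
        then 1 else 0) else 0) else 0
def eA (g : List (List Int)) (adj : List (Int × List (Int × Int))) (i j : Nat) : Int :=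
  if cellAt g i j ≠ 0 then
    (if j < (g.getD 0 []).length - 1 then
      (if cellAt g i (j + 1) ≠ 0 ∧ adjVal adj (cellAt g i j) (cellAt g i (j + 1)) ≠ 0
        then 1 else 0) else 0) else 0
def sA (g : List (List Int)) (adj : List (Int × List (Int × Int))) (i j : Nat) : Int :=
  if cellAt g i j ≠ 0 then
    (if i < g.length - 1 then
      (if cellAt g (i + 1) j ≠ 0 ∧ adjVal adj (cellAt g i j) (cellAt g (i + 1) j) ≠ 0
        then 1 else 0) else 0) else 0
def wA (g : List (List Int)) (adj : List (Int × List (Int × Int))) (i j : Nat) : Int :=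
  if cellAt g i j ≠ 0 then
    (if 0 < j then
      (if cellAt g i (j - 1) ≠ 0 ∧ adjVal adj (cellAt g i j) (cellAt g i (j - 1)) ≠ 0
        then 1 else 0) else 0) else 0

theorem list_sum_range (f : Nat → Int) (n : Nat) :
    ((List.range n).map f).sum = ∑ k ∈ Finset.range n, f k := by
  induction n with
  | zero => simp
  | succ n ih => simp [List.range_succ, Finset.sum_range_succ, ih]

theorem foldl_body {α : Type} (f : Int → α → Int) (t : α → Int)
    (h : ∀ s x, f s x = s + t x) (l : List α) (a : Int) :
    l.foldl f a = a + (l.map t).sum := by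
  rw [show f = fun s x => s + t x from funext fun s => funext fun x => h s x]
  exact PySem.List.foldl_add l t a

-- if-chain normalization lemmas for A's per-cell body
theorem addif (x : Int) (g c : Prop) [Decidable g] [Decidable c] :
    (if g then (if c then x + 1 else x) else x)
      = x + (if g then (if c then (1 : Int) else 0) else 0) := by
  split_ifs <;> ring

set_option maxHeartbeats 1600000 in
theorem evalA_eq_sum (g : List (List Int)) (adj : List (Int × List (Int × Int))) :
    eval_candidate g adj =
      ∑ i ∈ Finset.range g.length, ∑ j ∈ Finset.range (g.getD 0 []).length,
        (nA g adj i j + eA g adj i j + sA g adj i j + wA g adj i j) := by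
  have h1 : eval_candidate g adj = 0 + ((List.range g.length).map (fun i =>
      ((List.range (g.getD 0 []).length).map (fun j =>
        nA g adj i j + eA g adj i j + sA g adj i j + wA g adj i j)).sum)).sum := by
    unfold eval_candidate
    apply foldl_body
    intro s i
    apply foldl_body
    intro s' j
    simp only [nA, eA, sA, wA, cellAt]
    by_cases hc : (g.getD i []).getD j 0 ≠ 0
    · simp only [if_pos hc, addif]
      ring
    · simp only [if_neg hc]
      ring
  rw [h1, zero_add, list_sum_range]
  exact Finset.sum_congr rfl fun i _ => list_sum_range _ _

-- ===== B-side: the tally dictionary is a counter of a flat list of directed pairs =====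

-- the (up to two) directed pairs one horizontal / vertical edge contributes
def hChunk (g : List (List Int)) (i j : Nat) : List (Int × Int) :=
  if cellAt g i j ≠ 0 ∧ cellAt g i (j + 1) ≠ 0 then
    [(cellAt g i j, cellAt g i (j + 1)), (cellAt g i (j + 1), cellAt g i j)] else []
def vChunk (g : List (List Int)) (i j : Nat) : List (Int × Int) :=
  if cellAt g i j ≠ 0 ∧ cellAt g (i + 1) j ≠ 0 then
    [(cellAt g i j, cellAt g (i + 1) j), (cellAt g (i + 1) j, cellAt g i j)] else []

-- all directed truthy-neighbour pairs, in B's tally order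
def pairsList (g : List (List Int)) : List (Int × Int) :=
  ((List.range g.length).flatMap (fun i =>
    (List.range ((g.getD 0 []).length - 1)).flatMap (fun j => hChunk g i j))) ++
  ((List.range (g.length - 1)).flatMap (fun i =>
    (List.range (g.getD 0 []).length).flatMap (fun j => vChunk g i j)))

theorem hChunk_foldl (g : List (List Int)) (i j : Nat) (d : PySem.Dict (Int × Int) Int) :
    (hChunk g i j).foldl (fun d x => d.insert x (d.getD x 0 + 1)) d =
      (if cellAt g i j ≠ 0 ∧ cellAt g i (j + 1) ≠ 0 then
        ((d.insert (cellAt g i j, cellAt g i (j + 1))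
            (d.getD (cellAt g i j, cellAt g i (j + 1)) 0 + 1)).insert
          (cellAt g i (j + 1), cellAt g i j)
          ((d.insert (cellAt g i j, cellAt g i (j + 1))
              (d.getD (cellAt g i j, cellAt g i (j + 1)) 0 + 1)).getD
            (cellAt g i (j + 1), cellAt g i j) 0 + 1))
      else d) := by
  unfold hChunk
  split_ifs <;> simp [List.foldl]

theorem vChunk_foldl (g : List (List Int)) (i j : Nat) (d : PySem.Dict (Int × Int) Int) :
    (vChunk g i j).foldl (fun d x => d.insert x (d.getD x 0 + 1)) d =
      (if cellAt g i j ≠ 0 ∧ cellAt g (i + 1) j ≠ 0 then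
        ((d.insert (cellAt g i j, cellAt g (i + 1) j)
            (d.getD (cellAt g i j, cellAt g (i + 1) j) 0 + 1)).insert
          (cellAt g (i + 1) j, cellAt g i j)
          ((d.insert (cellAt g i j, cellAt g (i + 1) j)
              (d.getD (cellAt g i j, cellAt g (i + 1) j) 0 + 1)).getD
            (cellAt g (i + 1) j, cellAt g i j) 0 + 1))
      else d) := by
  unfold vChunk
  split_ifs <;> simp [List.foldl]

set_option maxHeartbeats 1600000 in
theorem evalB_closed (g : List (List Int)) (adj : List (Int × List (Int × Int))) :
    eval_candidate_alt g adj =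
      (PySem.Dict.counter (pairsList g)).items.foldl (fun score kv =>
        if adjVal adj kv.1.1 kv.1.2 ≠ 0 then score + kv.2 else score) 0 := by
  rw [← PySem.Dict.foldl_insert_getD_add_one_eq_counter]
  unfold pairsList
  rw [List.foldl_append]
  simp only [List.foldl_flatMap, hChunk_foldl, vChunk_foldl, cellAt]
  rfl

-- Σ over a nodup list of the indicator of one element x = the value at x
theorem sum_single (K : List (Int × Int)) (hnd : K.Nodup) (x : Int × Int) (w : Int × Int → Int)
    (hx : x ∈ K) :
    (K.map (fun k => if k = x then w k else 0)).sum = w x := by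
  induction K with
  | nil => cases hx
  | cons k K ih =>
    rcases List.mem_cons.mp hx with h | h
    · subst h
      have hnot : x ∉ K := (List.nodup_cons.mp hnd).1
      have hz : (K.map (fun k => if k = x then w k else 0)).sum = 0 := by
        apply List.sum_eq_zero
        intro y hy
        rcases List.mem_map.mp hy with ⟨k', hk', rfl⟩
        have : k' ≠ x := fun he => hnot (he ▸ hk')
        simp [this]
      simp [hz]
    · have hk : k ≠ x := fun he => ((List.nodup_cons.mp hnd).1) (he ▸ h)
      simp [hk, ih (List.nodup_cons.mp hnd).2 h]

-- Σ over a nodup key list covering L of (multiplicity in L) · (indicator) = Σ over L of indicator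
theorem sum_count_key (P : Int × Int → Prop) [DecidablePred P] (L K : List (Int × Int))
    (hnd : K.Nodup) (hmem : ∀ x ∈ L, x ∈ K) :
    (K.map (fun k => if P k then (L.count k : Int) else 0)).sum =
      (L.map (fun x => if P x then (1 : Int) else 0)).sum := by
  induction L with
  | nil => simp
  | cons x L ih =>
    have hx := hmem x (by simp)
    have hm : ∀ y ∈ L, y ∈ K := fun y hy => hmem y (by simp [hy])
    have hsplit : ∀ k, (if P k then ((x :: L).count k : Int) else 0) =
        (if P k then (L.count k : Int) else 0) + (if k = x then (if P k then (1 : Int) else 0) else 0) := by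
      intro k
      have hc : ((x :: L).count k : Int) = (L.count k : Int) + (if k = x then (1 : Int) else 0) := by
        simp only [List.count_cons, beq_iff_eq]
        push_cast
        by_cases hkx : k = x
        · rw [if_pos hkx.symm, if_pos hkx]
        · rw [if_neg (fun h => hkx h.symm), if_neg hkx]
      rw [hc]
      split_ifs <;> ring
    calc (K.map (fun k => if P k then ((x :: L).count k : Int) else 0)).sum
        = (K.map (fun k => (if P k then (L.count k : Int) else 0) +
            (if k = x then (if P k then (1 : Int) else 0) else 0))).sum := by
          exact congrArg List.sum (List.map_congr_left fun k _ => hsplit k)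
      _ = (K.map (fun k => if P k then (L.count k : Int) else 0)).sum +
            (K.map (fun k => if k = x then (if P k then (1 : Int) else 0) else 0)).sum := by
          exact PySem.List.sum_map_add_int K _ _
      _ = (L.map (fun y => if P y then (1 : Int) else 0)).sum + (if P x then (1 : Int) else 0) := by
          rw [ih hm, sum_single K hnd x _ hx]
      _ = ((x :: L).map (fun y => if P y then (1 : Int) else 0)).sum := by
          rw [List.map_cons, List.sum_cons]; ring

-- summing an indicator over counter items = summing it over the underlying list
theorem items_sum (L : List (Int × Int)) (P : Int × Int → Prop) [DecidablePred P] :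
    ((PySem.Dict.counter L).items.map (fun kv => if P kv.1 then kv.2 else 0)).sum =
      (L.map (fun x => if P x then (1 : Int) else 0)).sum := by
  rw [PySem.Dict.items_counter, List.map_map]
  have : ((fun kv : (Int × Int) × Int => if P kv.1 then kv.2 else 0) ∘
      fun k => (k, (L.count k : Int))) = fun k => if P k then (L.count k : Int) else 0 := rfl
  rw [this]
  exact sum_count_key P L (PySem.Set.ofList L) (PySem.Set.nodup_ofList L)
    (fun x h => (PySem.Set.mem_ofList L x).mpr h)

theorem sum_map_flatMap {α β : Type} (l : List α) (g : α → List β) (f : β → Int) :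
    ((l.flatMap g).map f).sum = (l.map (fun x => ((g x).map f).sum)).sum := by
  induction l with
  | nil => simp
  | cons x xs ih => simp [List.flatMap_cons, ih]

theorem hChunk_sum (g : List (List Int)) (adj : List (Int × List (Int × Int))) (i j : Nat)
    (hj : j < (g.getD 0 []).length - 1) :
    ((hChunk g i j).map (fun x => if adjVal adj x.1 x.2 ≠ 0 then (1 : Int) else 0)).sum =
      dirH g adj i j + dirHrev g adj i j := by
  have hj1 : j + 1 < (g.getD 0 []).length := by omega
  unfold hChunk dirH dirHrev
  by_cases ha : cellAt g i j ≠ 0 <;> by_cases hb : cellAt g i (j + 1) ≠ 0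
  · simp only [if_pos (And.intro ha hb), if_pos ha, if_pos hj1, if_pos hb,
      List.map_cons, List.map_nil, List.sum_cons, List.sum_nil]
    ring
  · have hcond : ¬(cellAt g i j ≠ 0 ∧ cellAt g i (j + 1) ≠ 0) := fun h => hb h.2
    simp only [if_neg hcond, List.map_nil, List.sum_nil, if_pos ha, if_pos hj1, if_neg hb]
    ring
  · have hcond : ¬(cellAt g i j ≠ 0 ∧ cellAt g i (j + 1) ≠ 0) := fun h => ha h.1
    simp only [if_neg hcond, List.map_nil, List.sum_nil, if_neg ha]
    ring
  · have hcond : ¬(cellAt g i j ≠ 0 ∧ cellAt g i (j + 1) ≠ 0) := fun h => ha h.1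
    simp only [if_neg hcond, List.map_nil, List.sum_nil, if_neg ha]
    ring

theorem vChunk_sum (g : List (List Int)) (adj : List (Int × List (Int × Int))) (i j : Nat)
    (hi : i < g.length - 1) :
    ((vChunk g i j).map (fun x => if adjVal adj x.1 x.2 ≠ 0 then (1 : Int) else 0)).sum =
      dirV g adj i j + dirVrev g adj i j := by
  have hi1 : i + 1 < g.length := by omega
  unfold vChunk dirV dirVrev
  by_cases ha : cellAt g i j ≠ 0 <;> by_cases hb : cellAt g (i + 1) j ≠ 0
  · simp only [if_pos (And.intro ha hb), if_pos ha, if_pos hi1, if_pos hb,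
      List.map_cons, List.map_nil, List.sum_cons, List.sum_nil]
    ring
  · have hcond : ¬(cellAt g i j ≠ 0 ∧ cellAt g (i + 1) j ≠ 0) := fun h => hb h.2
    simp only [if_neg hcond, List.map_nil, List.sum_nil, if_pos ha, if_pos hi1, if_neg hb]
    ring
  · have hcond : ¬(cellAt g i j ≠ 0 ∧ cellAt g (i + 1) j ≠ 0) := fun h => ha h.1
    simp only [if_neg hcond, List.map_nil, List.sum_nil, if_neg ha]
    ring
  · have hcond : ¬(cellAt g i j ≠ 0 ∧ cellAt g (i + 1) j ≠ 0) := fun h => ha h.1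
    simp only [if_neg hcond, List.map_nil, List.sum_nil, if_neg ha]
    ring

-- extend the horizontal j-sum from c-1 to c (the last column has no east edge)
theorem hsum_extend (g : List (List Int)) (adj : List (Int × List (Int × Int))) (i : Nat) :
    ∑ j ∈ Finset.range ((g.getD 0 []).length - 1), (dirH g adj i j + dirHrev g adj i j) =
      ∑ j ∈ Finset.range ((g.getD 0 []).length), (dirH g adj i j + dirHrev g adj i j) := by
  rcases Nat.eq_zero_or_pos (g.getD 0 []).length with h | h
  · rw [h]
  · obtain ⟨m, hm⟩ : ∃ m, (g.getD 0 []).length = m + 1 := ⟨_, (Nat.succ_pred_eq_of_pos h).symm⟩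
    rw [hm]
    have hz : dirH g adj i m + dirHrev g adj i m = 0 := by
      have : ¬(m + 1 < (g.getD 0 []).length) := by omega
      simp only [dirH, dirHrev, if_neg this, ite_self]
      ring
    rw [Finset.sum_range_succ, hz, add_zero]
    simp

theorem vsum_extend (g : List (List Int)) (adj : List (Int × List (Int × Int))) :
    ∑ i ∈ Finset.range (g.length - 1), ∑ j ∈ Finset.range ((g.getD 0 []).length),
        (dirV g adj i j + dirVrev g adj i j) =
      ∑ i ∈ Finset.range g.length, ∑ j ∈ Finset.range ((g.getD 0 []).length),
        (dirV g adj i j + dirVrev g adj i j) := by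
  rcases Nat.eq_zero_or_pos g.length with h | h
  · rw [h]
  · obtain ⟨m, hm⟩ : ∃ m, g.length = m + 1 := ⟨_, (Nat.succ_pred_eq_of_pos h).symm⟩
    rw [hm]
    have hz : ∀ j, dirV g adj m j + dirVrev g adj m j = 0 := by
      intro j
      have : ¬(m + 1 < g.length) := by omega
      simp only [dirV, dirVrev, if_neg this, ite_self]
      ring
    rw [Finset.sum_range_succ]
    simp [hz]

set_option maxHeartbeats 1600000 in
theorem evalB_eq_sum (g : List (List Int)) (adj : List (Int × List (Int × Int))) :
    eval_candidate_alt g adj =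
      ∑ i ∈ Finset.range g.length, ∑ j ∈ Finset.range (g.getD 0 []).length,
        (dirH g adj i j + dirHrev g adj i j + dirV g adj i j + dirVrev g adj i j) := by
  rw [evalB_closed]
  rw [foldl_body _ (fun kv => if adjVal adj kv.1.1 kv.1.2 ≠ 0 then kv.2 else 0)
    (by
      intro s kv
      by_cases h : adjVal adj kv.1.1 kv.1.2 ≠ 0 <;> simp [h]) _ 0, zero_add]
  rw [items_sum (pairsList g) (fun kv => adjVal adj kv.1 kv.2 ≠ 0)]
  unfold pairsList
  rw [List.map_append, List.sum_append]
  simp only [sum_map_flatMap]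
  have hH : ∀ i, ((List.range ((g.getD 0 []).length - 1)).map (fun j =>
      ((hChunk g i j).map (fun x => if adjVal adj x.1 x.2 ≠ 0 then (1 : Int) else 0)).sum)).sum =
      ∑ j ∈ Finset.range ((g.getD 0 []).length), (dirH g adj i j + dirHrev g adj i j) := by
    intro i
    rw [← hsum_extend, ← list_sum_range]
    exact congrArg List.sum (List.map_congr_left fun j hj =>
      hChunk_sum g adj i j (List.mem_range.mp hj))
  have hV : ((List.range (g.length - 1)).map (fun i => ((List.range ((g.getD 0 []).length)).map (fun j =>
      ((vChunk g i j).map (fun x => if adjVal adj x.1 x.2 ≠ 0 then (1 : Int) else 0)).sum)).sum)).sum =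
      ∑ i ∈ Finset.range g.length, ∑ j ∈ Finset.range ((g.getD 0 []).length),
        (dirV g adj i j + dirVrev g adj i j) := by
    rw [← vsum_extend, ← list_sum_range]
    refine congrArg List.sum (List.map_congr_left fun i hi => ?_)
    rw [← list_sum_range]
    exact congrArg List.sum (List.map_congr_left fun j _ =>
      vChunk_sum g adj i j (List.mem_range.mp hi))
  have h1 : ((List.range g.length).map (fun i => ((List.range ((g.getD 0 []).length - 1)).map (fun j =>
      ((hChunk g i j).map (fun x => if adjVal adj x.1 x.2 ≠ 0 then (1 : Int) else 0)).sum)).sum)).sum =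
      ∑ i ∈ Finset.range g.length, ∑ j ∈ Finset.range ((g.getD 0 []).length),
        (dirH g adj i j + dirHrev g adj i j) := by
    rw [← list_sum_range]
    exact congrArg List.sum (List.map_congr_left fun i _ => hH i)
  rw [h1, hV, ← Finset.sum_add_distrib]
  refine Finset.sum_congr rfl fun i _ => ?_
  rw [← Finset.sum_add_distrib]
  exact Finset.sum_congr rfl fun j _ => by ring

-- reindexing a guarded backwards-looking sum to a forwards-looking one
theorem shift_sum (w f : Nat → Int) (n : Nat) (h0 : w 0 = 0)
    (hs : ∀ k, k < n - 1 → w (k + 1) = f k) (hl : 0 < n → f (n - 1) = 0) :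
    ∑ j ∈ Finset.range n, w j = ∑ j ∈ Finset.range n, f j := by
  cases n with
  | zero => simp
  | succ m =>
    rw [Finset.sum_range_succ', Finset.sum_range_succ, h0,
      show f m = 0 by simpa using hl (Nat.succ_pos m)]
    simp only [add_zero]
    exact Finset.sum_congr rfl fun k hk => hs k (by simpa using hk)

-- ===== VERDICT (by name: the statement is the Claim_ definition above) =====
theorem eval_candidate_spec : Claim_equal_eval_candidate := by
  intro g adj _ _
  unfold Spec_eval_candidate
  rw [evalA_eq_sum, evalB_eq_sum]
  have hE : ∀ i j, eA g adj i j = dirH g adj i j := by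
    intro i j
    simp only [eA, dirH]
    split_ifs <;> omega
  have hS : ∀ i j, sA g adj i j = dirV g adj i j := by
    intro i j
    simp only [sA, dirV]
    split_ifs <;> omega
  have hW : ∀ i, ∑ j ∈ Finset.range (g.getD 0 []).length, wA g adj i j
      = ∑ j ∈ Finset.range (g.getD 0 []).length, dirHrev g adj i j := by
    intro i
    apply shift_sum
    · simp [wA]
    · intro k hk
      simp only [wA, dirHrev, Nat.add_sub_cancel]
      split_ifs <;> omega
    · intro hC
      have h : ¬((g.getD 0 []).length - 1 + 1 < (g.getD 0 []).length) := by omega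
      simp only [dirHrev, if_neg h, ite_self]
  have hN : ∑ i ∈ Finset.range g.length, ∑ j ∈ Finset.range (g.getD 0 []).length, nA g adj i j
      = ∑ i ∈ Finset.range g.length, ∑ j ∈ Finset.range (g.getD 0 []).length, dirVrev g adj i j := by
    apply shift_sum
    · exact Finset.sum_eq_zero fun j _ => by simp [nA]
    · intro k hk
      refine Finset.sum_congr rfl fun j _ => ?_
      simp only [nA, dirVrev, Nat.add_sub_cancel]
      split_ifs <;> omega
    · intro hR
      refine Finset.sum_eq_zero fun j _ => ?_
      have h : ¬(g.length - 1 + 1 < g.length) := by omega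
      simp only [dirVrev, if_neg h, ite_self]
  simp only [Finset.sum_add_distrib]
  rw [hN, Finset.sum_congr rfl fun i _ => Finset.sum_congr rfl fun j _ => hE i j,
      Finset.sum_congr rfl fun i _ => Finset.sum_congr rfl fun j _ => hS i j,
      Finset.sum_congr rfl fun i _ => hW i]
  ring
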